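-- pv_equiv track=rewrite | github.com/erosika/hermes-agent | hermes_cli/skin.py | _render_braille_grid
-- ===== SOURCE A (Python) =====
-- def _rgb_to_hex(rgb: tuple[int, int, int]) -> str:
--     return f"#{rgb[0]:02X}{rgb[1]:02X}{rgb[2]:02X}"
--
-- def _render_braille_grid(grid: list[list[tuple[int, int, int] | None]]) -> tuple[str, ...]:
--     """Render a dense 2x4-per-cell braille approximation for hero art."""
--     dot_bits = {
--         (0, 0): 0x01,
--         (0, 1): 0x02,
--         (0, 2): 0x04,
--         (1, 0): 0x08,
--         (1, 1): 0x10,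
--         (1, 2): 0x20,
--         (0, 3): 0x40,
--         (1, 3): 0x80,
--     }
--     lines: list[str] = []
--
--     for y in range(0, len(grid), 4):
--         line: list[str] = []
--         for x in range(0, len(grid[0]), 2):
--             mask = 0
--             active_colors: list[tuple[int, int, int]] = []
--             for dy in range(4):
--                 row_index = y + dy
--                 if row_index >= len(grid):
--                     continue
--                 row = grid[row_index]
--                 for dx in range(2):
--                     col_index = x + dx
--                     if col_index >= len(row):
--                         continue
--                     color = row[col_index]
--                     if color is None:
--                         continue
--                     mask |= dot_bits[(dx, dy)]
--                     active_colors.append(color)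
--
--             if mask == 0:
--                 line.append(" ")
--                 continue
--
--             count = len(active_colors)
--             foreground = (
--                 sum(color[0] for color in active_colors) // count,
--                 sum(color[1] for color in active_colors) // count,
--                 sum(color[2] for color in active_colors) // count,
--             )
--             glyph = chr(0x2800 + mask)
--             line.append(f"[{_rgb_to_hex(foreground)}]{glyph}[/]")
--         lines.append("".join(line).rstrip())
--
--     return tuple(lines)
-- ===== SOURCE B (Python) =====
-- def _rgb_to_hex(rgb: tuple[int, int, int]) -> str:
--     return f"#{rgb[0]:02X}{rgb[1]:02X}{rgb[2]:02X}"
--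
-- # Single pass over pixels accumulating per-cell (mask, channel sums, count) in a dict,
-- # then one pass over cell rows/cols emitting the glyphs.
-- def _render_braille_grid(grid):
--     dot = ((0x01, 0x08), (0x02, 0x10), (0x04, 0x20), (0x40, 0x80))  # [dy][dx]
--     if not grid:
--         return ()
--     n_cell_rows = (len(grid) + 3) // 4
--     n_cell_cols = (len(grid[0]) + 1) // 2
--     cells = {}
--     for r, row in enumerate(grid):
--         for c, px in enumerate(row):
--             if px is None or c // 2 >= n_cell_cols:
--                 continue
--             key = (r // 4, c // 2)
--             mask, sr, sg, sb, n = cells.get(key, (0, 0, 0, 0, 0))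
--             cells[key] = (mask | dot[r % 4][c % 2], sr + px[0], sg + px[1], sb + px[2], n + 1)
--     lines = []
--     for cy in range(n_cell_rows):
--         parts = []
--         for cx in range(n_cell_cols):
--             entry = cells.get((cy, cx))
--             if entry is None:
--                 parts.append(" ")
--             else:
--                 mask, sr, sg, sb, n = entry
--                 fg = (sr // n, sg // n, sb // n)
--                 parts.append(f"[{_rgb_to_hex(fg)}]{chr(0x2800 + mask)}[/]")
--         lines.append("".join(parts).rstrip())
--     return tuple(lines)
-- ===== Notes on version B (the rewrite author's own statement) =====
-- stated objective: alternative
-- what changed: A rescans the grid per braille cell with a nested 4x2 probe inside a double loop over cells; B makes a single row-major pass over the pixels, accumulating per-cell (mask, channel sums, count) in a dict keyed by (row//4, col//2), then emits the lines from the dict.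
import Mathlib
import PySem

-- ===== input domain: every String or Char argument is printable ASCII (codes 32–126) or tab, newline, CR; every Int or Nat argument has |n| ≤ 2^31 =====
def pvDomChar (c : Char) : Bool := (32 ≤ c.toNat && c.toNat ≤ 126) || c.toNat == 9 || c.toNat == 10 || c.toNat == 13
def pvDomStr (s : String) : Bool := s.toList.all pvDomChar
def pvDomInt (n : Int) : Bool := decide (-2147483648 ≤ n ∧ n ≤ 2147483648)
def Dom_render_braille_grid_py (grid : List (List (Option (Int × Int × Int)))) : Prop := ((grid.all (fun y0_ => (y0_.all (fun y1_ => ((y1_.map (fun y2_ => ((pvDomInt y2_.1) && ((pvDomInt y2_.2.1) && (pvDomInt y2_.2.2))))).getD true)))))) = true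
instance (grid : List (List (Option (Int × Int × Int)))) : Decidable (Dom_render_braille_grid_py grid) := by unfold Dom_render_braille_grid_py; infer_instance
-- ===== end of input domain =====

-- B replaces A's per-cell rescans (for every braille cell, a nested 4x2 probe of the grid) by one
-- row-major pass over the pixels that accumulates per-cell (mask, channel sums, count) in a dict,
-- then a pass over the cell rows/cols emitting the glyphs (objective: alternative decomposition).

-- ===== shared helpers (port of the module helper `_rgb_to_hex` and of the f-strings both
-- Pythons use verbatim) =====

-- uppercase hex digits of n, most significant first ([] for 0); exact for f"{n:X}" on n > 0
def pvHexChars : Nat → List Char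
  | 0 => []
  | n + 1 => pvHexChars ((n + 1) / 16) ++ [Char.ofNat (if (n + 1) % 16 < 10 then 48 + (n + 1) % 16 else 55 + (n + 1) % 16)]
decreasing_by exact Nat.div_lt_self (Nat.succ_pos n) (by omega)

-- exact port of Python's f"{v:02X}": sign, then hex digits, zero-padded to total width 2
def pvHex02X (v : Int) : List Char :=
  if v < 0 then '-' :: pvHexChars v.natAbs
  else
    let ds := if v = 0 then ['0'] else pvHexChars v.natAbs
    if ds.length < 2 then '0' :: ds else ds

-- port of `_rgb_to_hex` (as a char list)
def pvRgbToHex (c : Int × Int × Int) : List Char :=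
  '#' :: (pvHex02X c.1 ++ pvHex02X c.2.1 ++ pvHex02X c.2.2)

-- port of the cell f-string f"[{_rgb_to_hex(foreground)}]{glyph}[/]" with glyph = chr(0x2800 + mask)
def pvCellStr (fg : Int × Int × Int) (mask : Nat) : String :=
  String.ofList ('[' :: pvRgbToHex fg ++ (']' :: Char.ofNat (0x2800 + mask) :: ['[', '/', ']']))

-- ===== PORT A =====

-- A's dot_bits dict, keyed (dx, dy); every lookup A performs has dx < 2, dy < 4, so the
-- total-function rendering is exact (the default 0 branch is never reached on A's lookups)
def pvDotBits (dx dy : Nat) : Nat :=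
  match dx, dy with
  | 0, 0 => 0x01 | 0, 1 => 0x02 | 0, 2 => 0x04 | 1, 0 => 0x08
  | 1, 1 => 0x10 | 1, 2 => 0x20 | 0, 3 => 0x40 | 1, 3 => 0x80
  | _, _ => 0

def render_braille_grid_py (grid : List (List (Option (Int × Int × Int)))) : List String :=
  (PySem.List.pyRange 0 grid.length 4).foldl (fun lines y =>
    let line : List String :=
      (PySem.List.pyRange 0 (PySem.List.pyGetD grid 0 []).length 2).foldl (fun line x =>
        let st :=
          (List.range 4).foldl (fun st (dy : Nat) =>
            let rowIndex : Int := y + (dy : Int)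
            if rowIndex ≥ (grid.length : Int) then st
            else
              let row := PySem.List.pyGetD grid rowIndex []
              (List.range 2).foldl (fun st (dx : Nat) =>
                let colIndex : Int := x + (dx : Int)
                if colIndex ≥ (row.length : Int) then st
                else
                  match PySem.List.pyGetD row colIndex none with
                  | none => st
                  | some color => (st.1 ||| pvDotBits dx dy, st.2 ++ [color])) st)
            ((0 : Nat), ([] : List (Int × Int × Int)))
        if st.1 = 0 then line ++ [" "]
        else
          let count : Int := st.2.length
          let fg := (PySem.Int.floordiv ((st.2.map (fun c => c.1)).sum) count,
                     PySem.Int.floordiv ((st.2.map (fun c => c.2.1)).sum) count,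
                     PySem.Int.floordiv ((st.2.map (fun c => c.2.2)).sum) count)
          line ++ [pvCellStr fg st.1]) []
    lines ++ [PySem.Str.rstrip (PySem.Str.join "" line)]) []

-- ===== PORT B =====

-- B's `dot` tuple of tuples, indexed dot[dy][dx] with dy = r % 4, dx = c % 2
def pvDotTable (dy dx : Int) : Nat :=
  if dy = 0 then (if dx = 0 then 0x01 else 0x08)
  else if dy = 1 then (if dx = 0 then 0x02 else 0x10)
  else if dy = 2 then (if dx = 0 then 0x04 else 0x20)
  else (if dx = 0 then 0x40 else 0x80)

def render_braille_grid_py_alt (grid : List (List (Option (Int × Int × Int)))) : List String :=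
  if grid = [] then []
  else
    let nRows : Int := PySem.Int.floordiv ((grid.length : Int) + 3) 4
    let nCols : Int := PySem.Int.floordiv (((grid.headD []).length : Int) + 1) 2
    let cells : PySem.Dict (Int × Int) (Nat × Int × Int × Int × Int) :=
      (PySem.List.enumerate grid).foldl (fun d rr =>
        (PySem.List.enumerate rr.2).foldl (fun d cp =>
          match cp.2 with
          | none => d
          | some px =>
            if PySem.Int.floordiv cp.1 2 ≥ nCols then d
            else
              let key := (PySem.Int.floordiv rr.1 4, PySem.Int.floordiv cp.1 2)
              let e := d.getD key (0, 0, 0, 0, 0)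
              d.insert key (e.1 ||| pvDotTable (PySem.Int.mod rr.1 4) (PySem.Int.mod cp.1 2),
                            e.2.1 + px.1, e.2.2.1 + px.2.1, e.2.2.2.1 + px.2.2, e.2.2.2.2 + 1)) d)
        PySem.Dict.empty
    (PySem.List.pyRange 0 nRows 1).foldl (fun lines cy =>
      let parts : List String :=
        (PySem.List.pyRange 0 nCols 1).foldl (fun ps cx =>
          match cells.get? (cy, cx) with
          | none => ps ++ [" "]
          | some e =>
            ps ++ [pvCellStr (PySem.Int.floordiv e.2.1 e.2.2.2.2,
                              PySem.Int.floordiv e.2.2.1 e.2.2.2.2,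
                              PySem.Int.floordiv e.2.2.2.1 e.2.2.2.2) e.1]) []
      lines ++ [PySem.Str.rstrip (PySem.Str.join "" parts)]) []

-- ===== PRECONDITION & SPEC =====
def Spec_render_braille_grid_py (grid : List (List (Option (Int × Int × Int)))) (out : List String) : Prop := out = render_braille_grid_py_alt grid
instance (grid : List (List (Option (Int × Int × Int)))) (out : List String) : Decidable (Spec_render_braille_grid_py grid out) := by unfold Spec_render_braille_grid_py; infer_instance

-- ===== CLAIM (what is proved, stated in full; the proofs are below) =====
def Claim_equal_render_braille_grid_py : Prop := ∀ (grid : List (List (Option (Int × Int × Int)))), Dom_render_braille_grid_py grid → Spec_render_braille_grid_py grid (render_braille_grid_py grid)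

-- ===== LEMMAS AND PROOFS =====

-- ---- proof-side abbreviations ----

-- zero accumulator of B's per-cell entry (mask, sumR, sumG, sumB, count)
def pvZ : Nat × Int × Int × Int × Int := (0, 0, 0, 0, 0)

-- cell key of a pixel (r, c, color), as B computes it
def pvKeyOf (p : Int × Int × (Int × Int × Int)) : Int × Int :=
  (PySem.Int.floordiv p.1 4, PySem.Int.floordiv p.2.1 2)

-- B's per-pixel accumulator update
def pvUpd (e : Nat × Int × Int × Int × Int) (p : Int × Int × (Int × Int × Int)) :
    Nat × Int × Int × Int × Int :=
  (e.1 ||| pvDotTable (PySem.Int.mod p.1 4) (PySem.Int.mod p.2.1 2),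
   e.2.1 + p.2.2.1, e.2.2.1 + p.2.2.2.1, e.2.2.2.1 + p.2.2.2.2, e.2.2.2.2 + 1)

-- the pixel B's inner loop keeps from the enumerated entry cp of row r (none = skipped)
def pvRowF (nCols r : Int) (cp : Int × Option (Int × Int × Int)) :
    Option (Int × Int × (Int × Int × Int)) :=
  match cp.2 with
  | none => none
  | some px => if PySem.Int.floordiv cp.1 2 ≥ nCols then none else some (r, cp.1, px)

-- the row-major stream of active pixels B accumulates
def pvStream (grid : List (List (Option (Int × Int × Int)))) (nCols : Int) :
    List (Int × Int × (Int × Int × Int)) :=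
  (PySem.List.enumerate grid).flatMap
    (fun rr => (PySem.List.enumerate rr.2).filterMap (pvRowF nCols rr.1))

-- the active pixels of cell (cy, cx) in A's probing order, tagged (dy, dx, color)
def pvCellList (grid : List (List (Option (Int × Int × Int)))) (cy cx : Nat) :
    List (Nat × Nat × (Int × Int × Int)) :=
  (List.range 4).flatMap (fun dy =>
    (List.range 2).filterMap (fun dx =>
      (PySem.List.pyGetD (PySem.List.pyGetD grid ((4 * cy + dy : Nat) : Int) [])
        ((2 * cx + dx : Nat) : Int) none).map (fun px => (dy, dx, px))))

-- A's per-cell accumulation step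
def pvStepA (st : Nat × List (Int × Int × Int)) (q : Nat × Nat × (Int × Int × Int)) :
    Nat × List (Int × Int × Int) :=
  (st.1 ||| pvDotBits q.2.1 q.1, st.2 ++ [q.2.2])

-- B's per-cell accumulation step, on (dy, dx, color) tags
def pvStepB (e : Nat × Int × Int × Int × Int) (q : Nat × Nat × (Int × Int × Int)) :
    Nat × Int × Int × Int × Int :=
  (e.1 ||| pvDotBits q.2.1 q.1, e.2.1 + q.2.2.1, e.2.2.1 + q.2.2.2.1,
   e.2.2.2.1 + q.2.2.2.2, e.2.2.2.2 + 1)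

-- A's inner 4x2 probe for band top y and cell left x
def pvAst (grid : List (List (Option (Int × Int × Int)))) (y x : Int) :
    Nat × List (Int × Int × Int) :=
  (List.range 4).foldl (fun st (dy : Nat) =>
    let rowIndex : Int := y + (dy : Int)
    if rowIndex ≥ (grid.length : Int) then st
    else
      let row := PySem.List.pyGetD grid rowIndex []
      (List.range 2).foldl (fun st (dx : Nat) =>
        let colIndex : Int := x + (dx : Int)
        if colIndex ≥ (row.length : Int) then st
        else
          match PySem.List.pyGetD row colIndex none with
          | none => st
          | some color => (st.1 ||| pvDotBits dx dy, st.2 ++ [color])) st)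
    ((0 : Nat), ([] : List (Int × Int × Int)))

-- ---- general lemmas ----

theorem pv_filterMap_eq_flatMap_toList {a b : Type} (f : a → Option b) (l : List a) :
    l.filterMap f = l.flatMap (fun x => (f x).toList) := by
  induction l with
  | nil => rfl
  | cons x t ih => cases hx : f x <;> simp [hx, ih]

theorem pv_range_flatMap_window {b : Type} (n a k : Nat) (g : Nat → List b)
    (hout : ∀ j, j < n → (j < a ∨ a + k ≤ j) → g j = []) :
    (List.range n).flatMap g = (List.range k).flatMap (fun d => if a + d < n then g (a + d) else []) := by
  rcases Nat.lt_or_ge a n with han | hna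
  · set t := min k (n - a) with ht
    have hL : (List.range n).flatMap g = (List.range t).flatMap (fun d => g (a + d)) := by
      have h1 : n = a + (t + (n - a - t)) := by omega
      rw [h1, List.range_add, List.flatMap_append, List.flatMap_map, List.range_add,
        List.flatMap_append, List.flatMap_map]
      have e1 : (List.range a).flatMap g = [] := by
        rw [List.flatMap_eq_nil_iff]
        intro j hj
        exact hout j (by have := List.mem_range.mp hj; omega) (Or.inl (List.mem_range.mp hj))
      have e2 : (List.range (n - a - t)).flatMap (fun x => g (a + (t + x))) = [] := by
        rw [List.flatMap_eq_nil_iff]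
        intro j hj
        have hj' := List.mem_range.mp hj
        have htk : t = k := by omega
        exact hout (a + (t + j)) (by omega) (Or.inr (by omega))
      rw [e1, e2]
      simp
    have hR : (List.range k).flatMap (fun d => if a + d < n then g (a + d) else []) =
        (List.range t).flatMap (fun d => g (a + d)) := by
      have h1 : k = t + (k - t) := by omega
      rw [h1, List.range_add, List.flatMap_append, List.flatMap_map]
      have e2 : (List.range (k - t)).flatMap (fun x => if a + (t + x) < n then g (a + (t + x)) else []) = [] := by
        rw [List.flatMap_eq_nil_iff]
        intro j hj
        have hj' := List.mem_range.mp hj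
        have : ¬ (a + (t + j) < n) := by omega
        simp [this]
      rw [e2, List.append_nil]
      apply List.flatMap_congr
      · intro d hd
        have : a + d < n := by have := List.mem_range.mp hd; omega
        simp [this]
    rw [hL, hR]
  · rw [List.flatMap_eq_nil_iff.mpr, List.flatMap_eq_nil_iff.mpr]
    · intro d _
      have : ¬ (a + d < n) := by omega
      simp [this]
    · intro j hj
      exact hout j (List.mem_range.mp hj) (Or.inl (by have := List.mem_range.mp hj; omega))


theorem pv_get?_accum {kk vv aa : Type} [BEq kk] [LawfulBEq kk] [DecidableEq kk]
    (key : aa → kk) (z : vv) (upd : vv → aa → vv) :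
    ∀ (P : List aa) (d : PySem.Dict kk vv) (k : kk),
      (P.foldl (fun d p => d.insert (key p) (upd (d.getD (key p) z) p)) d).get? k =
        if (P.filter (fun p => key p == k)) = [] then d.get? k
        else some ((P.filter (fun p => key p == k)).foldl upd (d.getD k z)) := by
  intro P
  induction P with
  | nil => intro d k; simp
  | cons p P ih =>
    intro d k
    simp only [List.foldl_cons, List.filter_cons]
    by_cases hk : key p = k
    · subst hk
      rw [ih]
      simp only [PySem.Dict.getD_insert, PySem.Dict.get?_insert, beq_self_eq_true, if_true]
      rw [if_neg (List.cons_ne_nil _ _)]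
      simp only [List.foldl_cons]
      by_cases h1 : List.filter (fun q => key q == key p) P = []
      · rw [if_pos h1, h1]; simp
      · rw [if_neg h1]
    · have hk' : (key p == k) = false := beq_eq_false_iff_ne.mpr hk
      rw [ih]
      simp [hk', PySem.Dict.get?_insert, PySem.Dict.getD_insert, Ne.symm hk]

-- ---- B-side: the dict is the fold of the pixel stream ----

theorem pv_cells_eq (grid : List (List (Option (Int × Int × Int)))) (nCols : Int) :
    ((PySem.List.enumerate grid).foldl (fun d rr =>
        (PySem.List.enumerate rr.2).foldl (fun d cp =>
          match cp.2 with
          | none => d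
          | some px =>
            if PySem.Int.floordiv cp.1 2 ≥ nCols then d
            else
              let key := (PySem.Int.floordiv rr.1 4, PySem.Int.floordiv cp.1 2)
              let e := d.getD key (0, 0, 0, 0, 0)
              d.insert key (e.1 ||| pvDotTable (PySem.Int.mod rr.1 4) (PySem.Int.mod cp.1 2),
                            e.2.1 + px.1, e.2.2.1 + px.2.1, e.2.2.2.1 + px.2.2, e.2.2.2.2 + 1)) d)
      (PySem.Dict.empty : PySem.Dict (Int × Int) (Nat × Int × Int × Int × Int)))
    = (pvStream grid nCols).foldl (fun d p => d.insert (pvKeyOf p) (pvUpd (d.getD (pvKeyOf p) pvZ) p))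
        PySem.Dict.empty := by
  symm
  unfold pvStream
  rw [List.foldl_flatMap]
  apply PySem.List.foldl_congr_mem
  intro d rr _
  rw [List.foldl_filterMap]
  apply PySem.List.foldl_congr_mem
  intro acc cp _
  rcases cp with ⟨c, pxo⟩
  cases pxo with
  | none => simp [pvRowF]
  | some px =>
    simp only [pvRowF]
    split_ifs with hg
    · rfl
    · rfl

-- ---- the filtered stream of one cell is its cell list ----

theorem pv_stream_filter (grid : List (List (Option (Int × Int × Int)))) (nCols : Int)
    (cy cx : Nat) (hcx : (cx : Int) < nCols) :
    (pvStream grid nCols).filter (fun p => pvKeyOf p == ((cy : Int), (cx : Int))) =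
      (pvCellList grid cy cx).map
        (fun q => (((4 * cy + q.1 : Nat) : Int), ((2 * cx + q.2.1 : Nat) : Int), q.2.2)) := by
  unfold pvStream
  rw [List.filter_flatMap,
    PySem.List.enumerate_eq_map_pyRange grid ([] : List (Option (Int × Int × Int)))]
  have hlen : PySem.List.len grid = ((grid.length : Nat) : Int) := by simp [PySem.List.len]
  rw [hlen, PySem.List.pyRange_zero_natCast, List.flatMap_map, List.flatMap_map]
  have hout : ∀ j, j < grid.length → (j < 4 * cy ∨ 4 * cy + 4 ≤ j) →
      (List.filter (fun p => pvKeyOf p == ((cy : Int), (cx : Int)))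
        ((PySem.List.enumerate (PySem.List.pyGetD grid ((j : Nat) : Int) [])).filterMap
          (pvRowF nCols (j : Int)))) = [] := by
    intro j hj hjo
    rw [List.filter_filterMap, List.filterMap_eq_nil_iff]
    rintro ⟨c, pxo⟩ _
    cases pxo with
    | none => simp [pvRowF]
    | some px =>
      simp only [pvRowF]
      split_ifs with hg
      · rfl
      · have hj4 : PySem.Int.floordiv (j : Int) 4 = ((j / 4 : Nat) : Int) := by
          exact_mod_cast PySem.Int.floordiv_natCast j 4
        have hne : ((j / 4 : Nat) : Int) ≠ ((cy : Nat) : Int) := by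
          have : j / 4 ≠ cy := by omega
          exact_mod_cast this
        simp [Option.filter, pvKeyOf]
        omega
  rw [pv_range_flatMap_window grid.length (4 * cy) 4 _ hout]
  unfold pvCellList
  rw [List.map_flatMap]
  apply List.flatMap_congr
  intro dy hdy
  have hdy4 : dy < 4 := List.mem_range.mp hdy
  rw [List.map_filterMap]
  by_cases h4 : 4 * cy + dy < grid.length
  · rw [if_pos h4]
    set row := PySem.List.pyGetD grid ((4 * cy + dy : Nat) : Int) [] with hrowdef
    rw [List.filter_filterMap,
      PySem.List.enumerate_eq_map_pyRange row (none : Option (Int × Int × Int))]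
    have hlenr : PySem.List.len row = ((row.length : Nat) : Int) := by simp [PySem.List.len]
    rw [hlenr, PySem.List.pyRange_zero_natCast, List.filterMap_map, List.filterMap_map,
      pv_filterMap_eq_flatMap_toList, pv_filterMap_eq_flatMap_toList]
    have hout2 : ∀ c, c < row.length → (c < 2 * cx ∨ 2 * cx + 2 ≤ c) →
        ((Option.filter (fun p => pvKeyOf p == ((cy : Int), (cx : Int)))
          (pvRowF nCols ((4 * cy + dy : Nat) : Int)
            (((c : Nat) : Int), PySem.List.pyGetD row ((c : Nat) : Int) none))).toList) = [] := by
      intro c hc hco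
      cases hpx : PySem.List.pyGetD row ((c : Nat) : Int) none with
      | none => simp [pvRowF]
      | some px =>
        simp only [pvRowF]
        split_ifs with hg
        · rfl
        · have hc2 : PySem.Int.floordiv (c : Int) 2 = ((c / 2 : Nat) : Int) := by
            exact_mod_cast PySem.Int.floordiv_natCast c 2
          have hne : ((c / 2 : Nat) : Int) ≠ ((cx : Nat) : Int) := by
            have : c / 2 ≠ cx := by omega
            exact_mod_cast this
          simp [Option.filter, pvKeyOf]
          omega
    simp only [Function.comp_def]
    rw [pv_range_flatMap_window row.length (2 * cx) 2 _ hout2]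
    apply List.flatMap_congr
    intro dx hdx
    have hdx2 : dx < 2 := List.mem_range.mp hdx
    by_cases h2 : 2 * cx + dx < row.length
    · rw [if_pos h2]
      cases hpx : PySem.List.pyGetD row ((2 * cx + dx : Nat) : Int) none with
      | none => simp [pvRowF]
      | some px =>
        simp only [pvRowF]
        have hc2 : PySem.Int.floordiv ((2 * cx + dx : Nat) : Int) 2 = ((cx : Nat) : Int) := by
          have hd : (2 * cx + dx) / 2 = cx := by omega
          have h := PySem.Int.floordiv_natCast (2 * cx + dx) 2
          rw [hd] at h
          exact_mod_cast h
        have hg : ¬ (PySem.Int.floordiv ((2 * cx + dx : Nat) : Int) 2 ≥ nCols) := by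
          rw [hc2]; omega
        rw [if_neg hg]
        have hr4 : PySem.Int.floordiv ((4 * cy + dy : Nat) : Int) 4 = ((cy : Nat) : Int) := by
          have hd : (4 * cy + dy) / 4 = cy := by omega
          have h := PySem.Int.floordiv_natCast (4 * cy + dy) 4
          rw [hd] at h
          exact_mod_cast h
        simp [Option.filter, pvKeyOf]
        omega
    · rw [if_neg h2]
      have hpx : PySem.List.pyGetD row ((2 * cx + dx : Nat) : Int) none = none := by
        rw [PySem.List.pyGetD_natCast]
        exact List.getD_eq_default _ _ (by omega)
      push_cast at hpx
      simp [hpx]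
  · rw [if_neg h4]
    have hrow : PySem.List.pyGetD grid ((4 * cy + dy : Nat) : Int) [] = [] := by
      rw [PySem.List.pyGetD_natCast]
      exact List.getD_eq_default _ _ (by omega)
    rw [List.filterMap_eq_nil_iff.mpr]
    intro dx _
    have hrow' : PySem.List.pyGetD grid (4 * (cy : Int) + (dy : Int)) [] = [] := by
      rw [show (4 * (cy : Int) + (dy : Int)) = ((4 * cy + dy : Nat) : Int) from by push_cast; ring]
      exact hrow
    simp
    rw [hrow', PySem.List.pyGetD_of_nonneg _ _ (by positivity)]
    rfl

-- ---- A's probe is the fold of the cell list ----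

theorem pv_Ast_eq (grid : List (List (Option (Int × Int × Int)))) (cy cx : Nat) :
    pvAst grid (4 * (cy : Int)) (2 * (cx : Int)) =
      (pvCellList grid cy cx).foldl pvStepA (0, []) := by
  unfold pvAst pvCellList
  rw [List.foldl_flatMap]
  apply PySem.List.foldl_congr_mem
  intro st dy hdy
  have hdy4 : dy < 4 := List.mem_range.mp hdy
  rw [List.foldl_filterMap]
  push_cast
  by_cases hb : 4 * cy + dy < grid.length
  · rw [if_neg (by omega)]
    apply PySem.List.foldl_congr_mem
    intro st' dx hdx
    have hdx2 : dx < 2 := List.mem_range.mp hdx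
    by_cases hc : 2 * cx + dx < (PySem.List.pyGetD grid (4 * (cy : Int) + (dy : Int)) []).length
    · rw [if_neg (by omega)]
      cases hpx : PySem.List.pyGetD (PySem.List.pyGetD grid (4 * (cy : Int) + (dy : Int)) [])
          (2 * (cx : Int) + (dx : Int)) none with
      | none => simp
      | some px => simp [pvStepA]
    · rw [if_pos (by omega)]
      have hpx : PySem.List.pyGetD (PySem.List.pyGetD grid (4 * (cy : Int) + (dy : Int)) [])
          (2 * (cx : Int) + (dx : Int)) none = none := by
        rw [PySem.List.pyGetD_of_nonneg _ _ (by positivity)]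
        exact List.getD_eq_default _ _ (by omega)
      simp [hpx]
  · rw [if_pos (by omega)]
    have hrow : PySem.List.pyGetD grid (4 * (cy : Int) + (dy : Int)) [] = [] := by
      rw [PySem.List.pyGetD_of_nonneg _ _ (by positivity)]
      exact List.getD_eq_default _ _ (by omega)
    rw [PySem.List.foldl_congr_mem _ _ (fun st _ => st) st ?hbody]
    case hbody =>
      intro st' dx _
      rw [hrow]
      rw [PySem.List.pyGetD_of_nonneg _ _ (by positivity)]
      rfl
    exact (PySem.List.foldl_ignore _ _).symm

-- ---- membership bounds and bits ----

theorem pv_mem_cellList (grid : List (List (Option (Int × Int × Int)))) (cy cx : Nat)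
    (q : Nat × Nat × (Int × Int × Int)) (hq : q ∈ pvCellList grid cy cx) :
    q.1 < 4 ∧ q.2.1 < 2 := by
  simp only [pvCellList, List.mem_flatMap, List.mem_filterMap, List.mem_range] at hq
  obtain ⟨dy, hdy, dx, hdx, hq⟩ := hq
  obtain ⟨px, -, hq⟩ := Option.map_eq_some_iff.mp hq
  subst hq; exact ⟨hdy, hdx⟩

theorem pv_dotBits_ne (dx dy : Nat) (hdx : dx < 2) (hdy : dy < 4) : pvDotBits dx dy ≠ 0 := by
  interval_cases dx <;> interval_cases dy <;> decide

theorem pv_mask_ne (l : List (Nat × Nat × (Int × Int × Int)))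
    (hb : ∀ q ∈ l, pvDotBits q.2.1 q.1 ≠ 0) :
    ∀ s : Nat × List (Int × Int × Int), s.1 ≠ 0 ∨ l ≠ [] → (l.foldl pvStepA s).1 ≠ 0 := by
  induction l with
  | nil => intro s hs; simp only [List.foldl_nil]; tauto
  | cons q t ih =>
    intro s hs
    simp only [List.foldl_cons]
    apply ih (fun q hq => hb q (List.mem_cons_of_mem _ hq))
    left
    have hbit := hb q (List.mem_cons_self)
    have : pvDotBits q.2.1 q.1 ≤ s.1 ||| pvDotBits q.2.1 q.1 := Nat.right_le_or ..
    simp only [pvStepA]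
    omega

-- ---- relating the two accumulators ----

theorem pv_fold_rel (l : List (Nat × Nat × (Int × Int × Int))) :
    ∀ (m : Nat) (cs : List (Int × Int × Int)),
      l.foldl pvStepB (m, (cs.map (fun c => c.1)).sum, (cs.map (fun c => c.2.1)).sum,
        (cs.map (fun c => c.2.2)).sum, (cs.length : Int))
      = ((l.foldl pvStepA (m, cs)).1,
         ((l.foldl pvStepA (m, cs)).2.map (fun c => c.1)).sum,
         ((l.foldl pvStepA (m, cs)).2.map (fun c => c.2.1)).sum,
         ((l.foldl pvStepA (m, cs)).2.map (fun c => c.2.2)).sum,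
         ((l.foldl pvStepA (m, cs)).2.length : Int)) := by
  induction l with
  | nil => intro m cs; rfl
  | cons q t ih =>
    intro m cs
    simp only [List.foldl_cons]
    have := ih (m ||| pvDotBits q.2.1 q.1) (cs ++ [q.2.2])
    simp only [List.map_append, List.sum_append, List.length_append, List.map_cons, List.map_nil,
      List.sum_cons, List.sum_nil, List.length_cons, List.length_nil, pvStepB, pvStepA] at this ⊢
    push_cast at this
    simpa using this

-- two parallel appending loops over images of the same index list agree pointwise
theorem pv_fold_map2 {γ α β σ : Type} (l : List γ) (f : γ → α) (g : γ → β)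
    (ba : σ → α → σ) (bb : σ → β → σ)
    (h : ∀ k ∈ l, ∀ acc, ba acc (f k) = bb acc (g k)) :
    ∀ acc, (l.map f).foldl ba acc = (l.map g).foldl bb acc := by
  induction l with
  | nil => intro acc; rfl
  | cons x t ih =>
    intro acc
    simp only [List.map_cons, List.foldl_cons]
    rw [h x List.mem_cons_self acc]
    exact ih (fun k hk acc' => h k (List.mem_cons_of_mem _ hk) acc') _

-- B's dot table agrees with A's dot_bits dict on the reachable offsets
theorem pv_table_bits (dy dx : Nat) (h4 : dy < 4) (h2 : dx < 2) :
    pvDotTable (dy : Int) (dx : Int) = pvDotBits dx dy := by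
  interval_cases dy <;> interval_cases dx <;> decide

theorem pv_upd_step (cy cx : Nat) (e : Nat × Int × Int × Int × Int)
    (q : Nat × Nat × (Int × Int × Int)) (h4 : q.1 < 4) (h2 : q.2.1 < 2) :
    pvUpd e (((4 * cy + q.1 : Nat) : Int), ((2 * cx + q.2.1 : Nat) : Int), q.2.2) = pvStepB e q := by
  obtain ⟨dy, dx, px⟩ := q
  dsimp only at h4 h2 ⊢
  simp only [pvUpd, pvStepB]
  have h1 : PySem.Int.mod ((4 * cy + dy : Nat) : Int) 4 = (dy : Int) := by
    have h := PySem.Int.mod_natCast (4 * cy + dy) 4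
    rw [show (4 * cy + dy) % 4 = dy from by omega] at h
    exact_mod_cast h
  have h2' : PySem.Int.mod ((2 * cx + dx : Nat) : Int) 2 = (dx : Int) := by
    have h := PySem.Int.mod_natCast (2 * cx + dx) 2
    rw [show (2 * cx + dx) % 2 = dx from by omega] at h
    exact_mod_cast h
  rw [h1, h2', pv_table_bits dy dx h4 h2]

-- the central per-cell equality: A's 4x2 probe renders the same cell string as B's dict entry
theorem pv_cell_body (grid : List (List (Option (Int × Int × Int)))) (nCols : Int)
    (k j : Nat) (hj : (j : Int) < nCols) (acc : List String) :
    (if (pvAst grid (4 * (k : Int)) (2 * (j : Int))).1 = 0 then acc ++ [" "]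
     else acc ++ [pvCellStr
        (PySem.Int.floordiv (((pvAst grid (4 * (k : Int)) (2 * (j : Int))).2.map (fun c => c.1)).sum)
           (((pvAst grid (4 * (k : Int)) (2 * (j : Int))).2.length : Int)),
         PySem.Int.floordiv (((pvAst grid (4 * (k : Int)) (2 * (j : Int))).2.map (fun c => c.2.1)).sum)
           (((pvAst grid (4 * (k : Int)) (2 * (j : Int))).2.length : Int)),
         PySem.Int.floordiv (((pvAst grid (4 * (k : Int)) (2 * (j : Int))).2.map (fun c => c.2.2)).sum)
           (((pvAst grid (4 * (k : Int)) (2 * (j : Int))).2.length : Int)))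
        (pvAst grid (4 * (k : Int)) (2 * (j : Int))).1]) =
    (match ((PySem.List.enumerate grid).foldl (fun d rr =>
        (PySem.List.enumerate rr.2).foldl (fun d cp =>
          match cp.2 with
          | none => d
          | some px =>
            if PySem.Int.floordiv cp.1 2 ≥ nCols then d
            else
              let key := (PySem.Int.floordiv rr.1 4, PySem.Int.floordiv cp.1 2)
              let e := d.getD key (0, 0, 0, 0, 0)
              d.insert key (e.1 ||| pvDotTable (PySem.Int.mod rr.1 4) (PySem.Int.mod cp.1 2),
                            e.2.1 + px.1, e.2.2.1 + px.2.1, e.2.2.2.1 + px.2.2, e.2.2.2.2 + 1)) d)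
        (PySem.Dict.empty : PySem.Dict (Int × Int) (Nat × Int × Int × Int × Int))).get?
          ((k : Int), (j : Int)) with
     | none => acc ++ [" "]
     | some e => acc ++ [pvCellStr (PySem.Int.floordiv e.2.1 e.2.2.2.2,
         PySem.Int.floordiv e.2.2.1 e.2.2.2.2, PySem.Int.floordiv e.2.2.2.1 e.2.2.2.2) e.1]) := by
  rw [pv_cells_eq grid nCols]
  rw [pv_get?_accum pvKeyOf pvZ pvUpd (pvStream grid nCols) PySem.Dict.empty ((k : Int), (j : Int))]
  rw [pv_stream_filter grid nCols k j hj]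
  rw [pv_Ast_eq grid k j]
  by_cases hcl : pvCellList grid k j = []
  · simp [hcl, PySem.Dict.get?_empty]
  · have hbits : ∀ q ∈ pvCellList grid k j, pvDotBits q.2.1 q.1 ≠ 0 := fun q hq =>
      pv_dotBits_ne _ _ (pv_mem_cellList _ _ _ _ hq).2 (pv_mem_cellList _ _ _ _ hq).1
    have hmask := pv_mask_ne _ hbits ((0 : Nat), ([] : List (Int × Int × Int))) (Or.inr hcl)
    rw [if_neg hmask]
    have hmap : ¬ ((pvCellList grid k j).map
        (fun q => (((4 * k + q.1 : Nat) : Int), ((2 * j + q.2.1 : Nat) : Int), q.2.2))) = [] := by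
      simpa using hcl
    rw [if_neg hmap]
    rw [PySem.Dict.getD_empty, List.foldl_map]
    rw [PySem.List.foldl_congr_mem _ _ pvStepB pvZ
      (fun e q hq => pv_upd_step k j e q (pv_mem_cellList _ _ _ _ hq).1 (pv_mem_cellList _ _ _ _ hq).2)]
    have he := pv_fold_rel (pvCellList grid k j) 0 []
    simp only [List.map_nil, List.sum_nil, List.length_nil, Nat.cast_zero] at he
    rw [show pvZ = ((0 : Nat), (0 : Int), (0 : Int), (0 : Int), (0 : Int)) from rfl, he]

theorem pv_main (grid : List (List (Option (Int × Int × Int)))) :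
    render_braille_grid_py grid = render_braille_grid_py_alt grid := by
  match grid with
  | [] => rfl
  | r0 :: rest =>
  simp only [render_braille_grid_py, render_braille_grid_py_alt]
  rw [if_neg (List.cons_ne_nil r0 rest)]
  have hW : PySem.List.pyGetD (r0 :: rest) 0 [] = r0 := by
    rw [PySem.List.pyGetD_ofNat']; rfl
  simp only [hW, List.headD_cons]
  have hR : PySem.Int.floordiv (((r0 :: rest).length : Int) + 3) 4 =
      ((((r0 :: rest).length + 3) / 4 : Nat) : Int) := by
    exact_mod_cast PySem.Int.floordiv_natCast ((r0 :: rest).length + 3) 4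
  have hC : PySem.Int.floordiv ((r0.length : Int) + 1) 2 = (((r0.length + 1) / 2 : Nat) : Int) := by
    exact_mod_cast PySem.Int.floordiv_natCast (r0.length + 1) 2
  simp only [hR, hC]
  have hA4 : PySem.List.pyRange 0 ((r0 :: rest).length : Int) 4 =
      (List.range (((r0 :: rest).length + 3) / 4)).map (fun k : Nat => 0 + 4 * (k : Int)) := by
    rw [PySem.List.pyRange_of_pos _ _ (by norm_num : (0 : Int) < 4)]
    rw [if_pos (by exact_mod_cast Nat.succ_pos rest.length)]
    have hcnt : ((((r0 :: rest).length : Int) - 0 + 4 - 1) / 4).toNat = ((r0 :: rest).length + 3) / 4 := by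
      omega
    rw [hcnt]
  have hB1 : PySem.List.pyRange 0 (((((r0 :: rest).length + 3) / 4 : Nat)) : Int) 1 =
      (List.range (((r0 :: rest).length + 3) / 4)).map (fun k : Nat => (k : Int)) :=
    PySem.List.pyRange_zero_natCast _
  simp only [hA4, hB1]
  simp only [zero_add]
  refine pv_fold_map2 _ _ _ _ _ ?hline []
  intro k hk acc
  refine congrArg (fun s => acc ++ [PySem.Str.rstrip (PySem.Str.join "" s)]) ?hparts
  have hA2 : PySem.List.pyRange 0 (r0.length : Int) 2 =
      (List.range ((r0.length + 1) / 2)).map (fun j : Nat => 0 + 2 * (j : Int)) := by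
    rw [PySem.List.pyRange_of_pos _ _ (by norm_num : (0 : Int) < 2)]
    by_cases hw : 0 < r0.length
    · rw [if_pos (by exact_mod_cast hw)]
      have hcnt : (((r0.length : Int) - 0 + 2 - 1) / 2).toNat = (r0.length + 1) / 2 := by omega
      rw [hcnt]
    · have h0 : r0.length = 0 := by omega
      simp [h0]
  have hB2 : PySem.List.pyRange 0 ((((r0.length + 1) / 2 : Nat)) : Int) 1 =
      (List.range ((r0.length + 1) / 2)).map (fun j : Nat => (j : Int)) :=
    PySem.List.pyRange_zero_natCast _
  simp only [hA2, hB2]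
  simp only [zero_add]
  refine pv_fold_map2 _ _ _ _ _ ?hcell []
  intro j hj acc'
  exact pv_cell_body (r0 :: rest) (((r0.length + 1) / 2 : Nat) : Int) k j
    (by exact_mod_cast List.mem_range.mp hj) acc'


-- ===== VERDICT (by name: the statement is the Claim_ definition above) =====
theorem render_braille_grid_py_spec : Claim_equal_render_braille_grid_py := by
  intro grid _
  exact pv_main grid
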